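-- pv_equiv track=rewrite | github.com/AvdikR/SATPR_Rybchynchuk | Lab_7/Lab7.py | absolute_majority
-- ===== SOURCE A (Python) =====
-- def absolute_majority(profile):
--     remaining_candidates = list(profile[0][1])  # Кандидати, які ще не вийшли з гри
--     votes_required = sum(vote[0] for vote in profile) // 2 + 1  # Потрібна кількість голосів для перемоги
--     while len(remaining_candidates) > 1:
--         candidate_scores = {candidate: 0 for candidate in remaining_candidates}
--         for vote in profile:
--             for i, candidate in enumerate(remaining_candidates):
--                 if vote[1][0] == candidate:
--                     candidate_scores[candidate] += vote[0]
--                     break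
--         winner = min(candidate_scores, key=candidate_scores.get)
--         if candidate_scores[winner] >= votes_required:
--             return winner
--         else:
--             remaining_candidates.remove(winner)
--     return remaining_candidates[0]
-- ===== SOURCE B (Python) =====
-- def absolute_majority(profile):
--     candidates = list(dict.fromkeys(profile[0][1]))
--     required = sum(w for w, _ in profile) // 2 + 1
--     scores = dict.fromkeys(candidates, 0)
--     for w, ballot in profile:
--         top = ballot[0]
--         if top in scores:
--             scores[top] += w
--     order = sorted(candidates, key=lambda c: scores[c])
--     for c in order[:-1]:
--         if scores[c] >= required:
--             return c
--     return order[-1]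
-- ===== Notes on version B (the rewrite author's own statement) =====
-- stated objective: faster
-- what changed: A re-scores all remaining candidates against every vote in every elimination round (the first-preference scores never change, so this is redundant); B computes the fixed first-preference scores in one pass over the votes, stable-sorts the candidates by score once, and scans that ascending order, which yields exactly A's elimination sequence.
-- outside the precondition, e.g. on absolute_majority([(3, ['a']), (2, [])]): A returns 'a', B raises IndexError; on absolute_majority([(2, ['a', 'b', 'a']), (2, ['b', 'a'])]): A returns 'a', B returns 'b'
import Mathlib
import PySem

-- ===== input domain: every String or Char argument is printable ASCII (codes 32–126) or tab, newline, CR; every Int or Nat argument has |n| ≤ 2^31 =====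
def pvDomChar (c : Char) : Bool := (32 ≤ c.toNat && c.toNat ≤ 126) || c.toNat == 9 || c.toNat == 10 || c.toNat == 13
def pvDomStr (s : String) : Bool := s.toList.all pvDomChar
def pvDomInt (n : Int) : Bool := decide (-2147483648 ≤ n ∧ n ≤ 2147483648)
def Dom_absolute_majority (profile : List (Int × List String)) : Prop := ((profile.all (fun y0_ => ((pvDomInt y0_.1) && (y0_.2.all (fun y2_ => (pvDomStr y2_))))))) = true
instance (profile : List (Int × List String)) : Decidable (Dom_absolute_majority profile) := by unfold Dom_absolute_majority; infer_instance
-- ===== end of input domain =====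

-- B replaces A's per-round re-scoring with one scoring pass, one stable sort by fixed first-preference
-- score, and a single scan of that ascending order (measured faster); A mutates only its local copy of the candidate list.
-- ===== PORT A =====
-- inner 'for i, candidate in enumerate(remaining): if vote[1][0] == candidate: scores[candidate] += vote[0]; break'
def pvScanAdd (w : Int) (b0 : String) : List String → PySem.Dict String Int → PySem.Dict String Int
  | [], d => d
  | c :: rest, d => if b0 = c then d.modify c 0 (· + w) else pvScanAdd w b0 rest d

-- 'candidate_scores = {c: 0 for c in remaining}' then the vote loop
def pvAScores (profile : List (Int × List String)) (remaining : List String) : PySem.Dict String Int :=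
  profile.foldl (fun d v => pvScanAdd v.1 (v.2.headD "") remaining d)
    (remaining.foldl (fun d c => d.insert c 0) PySem.Dict.empty)

-- the while-loop; fuel = initial length is only a totality guard (each pass removes one candidate)
def pvALoop (profile : List (Int × List String)) (required : Int) : Nat → List String → String
  | 0, remaining => remaining.headD ""
  | fuel + 1, remaining =>
    if 1 < remaining.length then
      let scores := pvAScores profile remaining
      match PySem.List.min? scores.keys (fun c => scores.getD c 0) with
      | none => ""  -- unreachable: remaining is nonempty here
      | some winner =>
        if required ≤ scores.getD winner 0 then winner
        else
          match PySem.List.remove? remaining winner with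
          | none => ""  -- unreachable: winner ∈ remaining
          | some rest => pvALoop profile required fuel rest
    else remaining.headD ""

def absolute_majority (profile : List (Int × List String)) : String :=
  let remaining := (profile.headD (0, [])).2
  let required := PySem.Int.floordiv (profile.map (·.1)).sum 2 + 1
  pvALoop profile required remaining.length remaining

-- ===== PORT B =====
-- 'for c in order[:-1]: if scores[c] >= required: return c' then 'return order[-1]'
def pvBScan (required : Int) (scores : PySem.Dict String Int) : List String → String
  | [] => ""  -- unreachable: candidates is nonempty
  | [c] => c
  | c :: c' :: rest => if required ≤ scores.getD c 0 then c else pvBScan required scores (c' :: rest)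

def absolute_majority_alt (profile : List (Int × List String)) : String :=
  let candidates := PySem.List.dedup (profile.headD (0, [])).2
  let required := PySem.Int.floordiv (profile.map (·.1)).sum 2 + 1
  let scores := profile.foldl
    (fun d v => if d.contains (v.2.headD "") then d.modify (v.2.headD "") 0 (· + v.1) else d)
    (candidates.foldl (fun d c => d.insert c 0) PySem.Dict.empty)
  let order := PySem.List.sorted candidates (fun c => scores.getD c 0) false
  pvBScan required scores order

-- ===== PRECONDITION & SPEC =====
-- Pre_ excludes: the empty profile and profiles with an empty ballot, on which A raises IndexError except in the
-- degenerate single-candidate case (where B still raises); and duplicate candidate names in the first ballot, on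
-- which A's dict-order tie-breaking over a list with repeated names is accidental.
def Pre_absolute_majority (profile : List (Int × List String)) : Prop :=
  profile ≠ [] ∧ (∀ v ∈ profile, v.2 ≠ []) ∧ ((profile.headD (0, [])).2).Nodup

instance (profile : List (Int × List String)) : Decidable (Pre_absolute_majority profile) := by
  unfold Pre_absolute_majority; infer_instance

def pvWitness_absolute_majority : (List (Int × List String)) := [(1, ["a", "b"]), (2, ["b", "a"])]

def Spec_absolute_majority (profile : List (Int × List String)) (out : String) : Prop := out = absolute_majority_alt profile
instance (profile : List (Int × List String)) (out : String) : Decidable (Spec_absolute_majority profile out) := by unfold Spec_absolute_majority; infer_instance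

-- ===== CLAIM (what is proved, stated in full; the proofs are below) =====
def Claim_equal_absolute_majority : Prop := ∀ (profile : List (Int × List String)), Dom_absolute_majority profile → Pre_absolute_majority profile → Spec_absolute_majority profile (absolute_majority profile)

-- ===== LEMMAS AND PROOFS =====

-- fixed first-preference score of candidate c (A recomputes it each round; it never changes)
def pvBase (profile : List (Int × List String)) (c : String) : Int :=
  profile.foldl (fun acc v => if v.2.headD "" = c then acc + v.1 else acc) 0

-- pvBScan with the score function in place of the dict (proof vehicle)
def pvBScanAbs (required : Int) (f : String → Int) : List String → String
  | [] => ""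
  | [c] => c
  | c :: c' :: rest => if required ≤ f c then c else pvBScanAbs required f (c' :: rest)

lemma pvBase_shift (c : String) : ∀ (p : List (Int × List String)) (a : Int),
    p.foldl (fun acc v => if v.2.headD "" = c then acc + v.1 else acc) a = a + pvBase p c := by
  intro p
  induction p with
  | nil => intro a; simp [pvBase]
  | cons v p ih =>
    intro a
    simp only [pvBase, List.foldl_cons]
    rw [ih, ih]
    split_ifs <;> ring

lemma pvBase_cons (v : Int × List String) (p : List (Int × List String)) (c : String) :
    pvBase (v :: p) c = (if v.2.headD "" = c then v.1 else 0) + pvBase p c := by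
  simp only [pvBase, List.foldl_cons]
  rw [pvBase_shift c p]
  split_ifs <;> simp [pvBase]

lemma pvScanAdd_eq (w : Int) (b0 : String) : ∀ (r : List String) (d : PySem.Dict String Int),
    pvScanAdd w b0 r d = if b0 ∈ r then d.modify b0 0 (· + w) else d := by
  intro r
  induction r with
  | nil => intro d; simp [pvScanAdd]
  | cons c rest ih =>
    intro d
    by_cases hb : b0 = c
    · subst hb; simp [pvScanAdd]
    · simp [pvScanAdd, hb, ih, List.mem_cons]

lemma pvInit_getD (c : String) : ∀ (r : List String) (d : PySem.Dict String Int),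
    d.getD c 0 = 0 → (r.foldl (fun d c => d.insert c 0) d).getD c 0 = 0 := by
  intro r
  induction r with
  | nil => intro d h; simpa using h
  | cons c' rest ih =>
    intro d h
    simp only [List.foldl_cons]
    exact ih _ (by rw [PySem.Dict.getD_insert]; split_ifs <;> simp [h])

lemma pvInit_keys (r : List String) :
    (r.foldl (fun d c => d.insert c 0) (PySem.Dict.empty : PySem.Dict String Int)).keys = PySem.List.dedup r := by
  have h := PySem.Dict.keys_foldl_insert r (fun _ _ => (0 : Int)) PySem.Dict.empty
  rw [PySem.Dict.keys_empty, PySem.Set.update_nil_left] at h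
  rw [PySem.List.dedup_eq_ofList]
  exact h

-- A's vote loop: keys stay the candidate list, getD accumulates the fixed scores
lemma pvAFold_spec : ∀ (p : List (Int × List String)) (d : PySem.Dict String Int) (r : List String),
    d.keys = PySem.List.dedup r →
    (p.foldl (fun d v => pvScanAdd v.1 (v.2.headD "") r d) d).keys = PySem.List.dedup r ∧
    ∀ c ∈ r, (p.foldl (fun d v => pvScanAdd v.1 (v.2.headD "") r d) d).getD c 0 = d.getD c 0 + pvBase p c := by
  intro p
  induction p with
  | nil => intro d r hk; exact ⟨hk, by simp [pvBase]⟩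
  | cons v p ih =>
    intro d r hk
    simp only [List.foldl_cons]
    rw [pvScanAdd_eq]
    by_cases hm : v.2.headD "" ∈ r
    · rw [if_pos hm]
      have hkeys : (d.modify (v.2.headD "") 0 (· + v.1)).keys = PySem.List.dedup r := by
        rw [PySem.Dict.keys_modify, PySem.Dict.keys_insert_of_contains]
        · exact hk
        · rw [PySem.Dict.contains_iff_mem_keys, hk, PySem.List.mem_dedup]; exact hm
      obtain ⟨h1, h2⟩ := ih (d.modify (v.2.headD "") 0 (· + v.1)) r hkeys
      refine ⟨h1, fun c hc => ?_⟩
      rw [h2 c hc, PySem.Dict.getD_modify, pvBase_cons]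
      rcases eq_or_ne c (v.2.headD "") with h | h
      · rw [if_pos h, if_pos h.symm, h]; ring
      · rw [if_neg h, if_neg (fun hh => h hh.symm)]; ring
    · rw [if_neg hm]
      obtain ⟨h1, h2⟩ := ih d r hk
      refine ⟨h1, fun c hc => ?_⟩
      rw [h2 c hc, pvBase_cons]
      rw [if_neg (show ¬(v.2.headD "" = c) from fun hh => hm (by rw [hh]; exact hc))]; ring

lemma pvAScores_keys (profile : List (Int × List String)) (r : List String) :
    (pvAScores profile r).keys = PySem.List.dedup r := by
  exact (pvAFold_spec profile _ r (pvInit_keys r)).1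

lemma pvAScores_getD (profile : List (Int × List String)) (r : List String) (c : String) (hc : c ∈ r) :
    (pvAScores profile r).getD c 0 = pvBase profile c := by
  have h := (pvAFold_spec profile _ r (pvInit_keys r)).2 c hc
  rw [pvAScores, h, pvInit_getD c r PySem.Dict.empty (PySem.Dict.getD_empty c 0)]
  ring

-- B's vote loop
lemma pvBFold_spec (key0 : List String) : ∀ (p : List (Int × List String)) (d : PySem.Dict String Int),
    d.keys = key0 →
    (p.foldl (fun d v => if d.contains (v.2.headD "") then d.modify (v.2.headD "") 0 (· + v.1) else d) d).keys = key0 ∧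
    ∀ c ∈ key0, (p.foldl (fun d v => if d.contains (v.2.headD "") then d.modify (v.2.headD "") 0 (· + v.1) else d) d).getD c 0 = d.getD c 0 + pvBase p c := by
  intro p
  induction p with
  | nil => intro d hk; exact ⟨hk, by simp [pvBase]⟩
  | cons v p ih =>
    intro d hk
    simp only [List.foldl_cons]
    by_cases hc : d.contains (v.2.headD "") = true
    · rw [if_pos hc]
      have hkeys : (d.modify (v.2.headD "") 0 (· + v.1)).keys = key0 := by
        rw [PySem.Dict.keys_modify, PySem.Dict.keys_insert_of_contains _ _ hc, hk]
      obtain ⟨h1, h2⟩ := ih (d.modify (v.2.headD "") 0 (· + v.1)) hkeys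
      refine ⟨h1, fun c hcm => ?_⟩
      rw [h2 c hcm, PySem.Dict.getD_modify, pvBase_cons]
      rcases eq_or_ne c (v.2.headD "") with h | h
      · rw [if_pos h, if_pos h.symm, h]; ring
      · rw [if_neg h, if_neg (fun hh => h hh.symm)]; ring
    · rw [if_neg (by simpa using hc)]
      obtain ⟨h1, h2⟩ := ih d hk
      refine ⟨h1, fun c hcm => ?_⟩
      rw [h2 c hcm, pvBase_cons]
      have hne : ¬ (v.2.headD "" = c) := by
        intro hh
        exact hc (by rw [PySem.Dict.contains_iff_mem_keys, hk, hh]; exact hcm)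
      rw [if_neg hne]; ring

-- min? with pointwise-equal keys
lemma pvMin?_congr (f g : String → Int) : ∀ (l : List String) (acc : Option String),
    (∀ c ∈ l, f c = g c) → (∀ m, acc = some m → f m = g m) →
    l.foldl (fun acc x => match acc with | none => some x | some m => if f x < f m then some x else some m) acc =
    l.foldl (fun acc x => match acc with | none => some x | some m => if g x < g m then some x else some m) acc := by
  intro l
  induction l with
  | nil => intro acc _ _; rfl
  | cons x t ih =>
    intro acc hl hacc
    simp only [List.foldl_cons]
    have hx : f x = g x := hl x List.mem_cons_self
    cases acc with
    | none =>
      exact ih (some x) (fun c hc => hl c (List.mem_cons_of_mem _ hc)) (fun m hm => by cases hm; exact hx)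
    | some m =>
      have hm : f m = g m := hacc m rfl
      dsimp only
      rw [hx, hm]
      split_ifs with h
      · exact ih (some x) (fun c hc => hl c (List.mem_cons_of_mem _ hc)) (fun m hm => by cases hm; exact hx)
      · exact ih (some m) (fun c hc => hl c (List.mem_cons_of_mem _ hc)) (fun m' hm' => by cases hm'; exact hacc _ rfl)

lemma pvMin?_eq_foldl (f : String → Int) (l : List String) :
    PySem.List.min? l f =
    l.foldl (fun acc x => match acc with | none => some x | some m => if f x < f m then some x else some m) none := by
  unfold PySem.List.min?
  congr 1
  funext acc x
  cases acc <;> rfl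

lemma pvMin?_congr' (l : List String) (f g : String → Int) (h : ∀ c ∈ l, f c = g c) :
    PySem.List.min? l f = PySem.List.min? l g := by
  rw [pvMin?_eq_foldl f l, pvMin?_eq_foldl g l]
  exact pvMin?_congr f g l none h (fun m hm => by cases hm)

lemma pvInsertBy_congr (f g : String → Int) (x : String) : ∀ (l : List String),
    (∀ c ∈ x :: l, f c = g c) →
    PySem.List.insertBy (fun a b => decide (f a < f b)) x l = PySem.List.insertBy (fun a b => decide (g a < g b)) x l := by
  intro l
  induction l with
  | nil => intro _; rfl
  | cons y ys ih =>
    intro h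
    have hx : f x = g x := h x List.mem_cons_self
    have hy : f y = g y := h y (List.mem_cons_of_mem _ List.mem_cons_self)
    simp only [PySem.List.insertBy, hx, hy]
    split_ifs with hb
    · rfl
    · have := ih (fun c hc => by
        rcases List.mem_cons.mp hc with h1 | h1
        · exact h c (h1 ▸ List.mem_cons_self)
        · exact h c (List.mem_cons_of_mem _ (List.mem_cons_of_mem _ h1)))
      rw [this]

lemma pvSortedAux_congr (f g : String → Int) : ∀ (r : List String) (acc : List String),
    (∀ c ∈ r, f c = g c) → (∀ c ∈ acc, f c = g c) →
    r.foldl (fun acc x => PySem.List.insertBy (fun a b => decide (f a < f b)) x acc) acc =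
    r.foldl (fun acc x => PySem.List.insertBy (fun a b => decide (g a < g b)) x acc) acc := by
  intro r
  induction r with
  | nil => intro acc _ _; rfl
  | cons x t ih =>
    intro acc hr hacc
    simp only [List.foldl_cons]
    have hx : ∀ c ∈ x :: acc, f c = g c := by
      intro c hc
      rcases List.mem_cons.mp hc with h1 | h1
      · exact hr c (h1 ▸ List.mem_cons_self)
      · exact hacc c h1
    rw [pvInsertBy_congr f g x acc hx]
    exact ih _ (fun c hc => hr c (List.mem_cons_of_mem _ hc))
      (fun c hc => hx c ((PySem.List.mem_insertBy _ _ _ _).mp hc |>.elim (fun h1 => h1 ▸ List.mem_cons_self) (fun h1 => List.mem_cons_of_mem _ h1)))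

lemma pvSorted_congr (f g : String → Int) : ∀ (r : List String), (∀ c ∈ r, f c = g c) →
    PySem.List.sorted r f false = PySem.List.sorted r g false := by
  intro r h
  show (r.foldl (fun acc x => PySem.List.insertBy (fun a b => decide (f a < f b)) x acc) []) =
    (r.foldl (fun acc x => PySem.List.insertBy (fun a b => decide (g a < g b)) x acc) [])
  exact pvSortedAux_congr f g r [] h (by simp)

lemma pvSorted_append_singleton (t : List String) (x : String) (f : String → Int) :
    PySem.List.sorted (t ++ [x]) f false =
      PySem.List.insertBy (fun a b => decide (f a < f b)) x (PySem.List.sorted t f false) := by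
  show ((t ++ [x]).foldl (fun acc y => PySem.List.insertBy (fun a b => decide (f a < f b)) y acc) []) =
    PySem.List.insertBy (fun a b => decide (f a < f b)) x
      (t.foldl (fun acc y => PySem.List.insertBy (fun a b => decide (f a < f b)) y acc) [])
  rw [List.foldl_append, List.foldl_cons, List.foldl_nil]

lemma pvMin?_append_singleton (t : List String) (x : String) (f : String → Int) :
    PySem.List.min? (t ++ [x]) f =
      match PySem.List.min? t f with
      | none => some x
      | some m => if f x < f m then some x else some m := by
  rw [pvMin?_eq_foldl f (t ++ [x]), List.foldl_append, List.foldl_cons, List.foldl_nil,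
    ← pvMin?_eq_foldl f t]

-- the crux: a stable sort starts with the first minimal element, and its tail sorts the rest
lemma pvSorted_min_cons (f : String → Int) (r : List String) (m : String)
    (h : PySem.List.min? r f = some m) :
    PySem.List.sorted r f false = m :: PySem.List.sorted (r.erase m) f false := by
  induction r using List.reverseRecOn generalizing m with
  | nil => simp [PySem.List.min?] at h
  | append_singleton t x ih =>
    rw [pvMin?_append_singleton] at h
    cases hmin : PySem.List.min? t f with
    | none =>
      have ht : t = [] := (PySem.List.min?_eq_none_iff t f).mp hmin
      rw [hmin] at h
      simp only at h
      cases h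
      subst ht
      simp [PySem.List.sorted, PySem.List.insertBy, List.erase_cons_head]
    | some mt =>
      rw [hmin] at h
      simp only at h
      by_cases hlt : f x < f mt
      · rw [if_pos hlt] at h
        cases h
        have hxt : x ∉ t := by
          intro hx
          exact absurd (PySem.List.min?_isMin hmin x hx) (by omega)
        have herase : (t ++ [x]).erase x = t := by
          rw [List.erase_append_right _ hxt, List.erase_cons_head, List.append_nil]
        rw [herase, pvSorted_append_singleton]
        cases hs : PySem.List.sorted t f false with
        | nil =>
          exact absurd ((PySem.List.sorted_eq_nil_iff t f false).mp hs) (by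
            intro hh; rw [hh] at hmin; simp [PySem.List.min?] at hmin)
        | cons hd tl =>
          have hhd : hd ∈ t := (PySem.List.mem_sorted t f false hd).mp (hs ▸ List.mem_cons_self)
          have hfx : f x < f hd := lt_of_lt_of_le hlt (PySem.List.min?_isMin hmin hd hhd)
          simp [PySem.List.insertBy, hfx]
      · rw [if_neg hlt] at h
        cases h
        have hmt : m ∈ t := PySem.List.min?_mem hmin
        rw [List.erase_append_left _ hmt, pvSorted_append_singleton, pvSorted_append_singleton, ih _ hmin]
        simp [PySem.List.insertBy, hlt]

-- the elimination loop scans the ascending order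
lemma pvLoop_eq (profile : List (Int × List String)) (req : Int) : ∀ (fuel : Nat) (r : List String),
    r.Nodup → r ≠ [] → r.length ≤ fuel + 1 →
    pvALoop profile req fuel r = pvBScanAbs req (pvBase profile) (PySem.List.sorted r (pvBase profile) false) := by
  intro fuel
  induction fuel with
  | zero =>
    intro r hnd hne hlen
    obtain ⟨c, hc⟩ : ∃ c, r = [c] := by
      cases r with
      | nil => exact absurd rfl hne
      | cons a t => cases t with
        | nil => exact ⟨a, rfl⟩
        | cons b u => simp at hlen
    subst hc
    simp [pvALoop, PySem.List.sorted, PySem.List.insertBy, pvBScanAbs]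
  | succ f ih =>
    intro r hnd hne hlen
    by_cases hlong : 1 < r.length
    · have hkeys := pvAScores_keys profile r
      have hded : PySem.List.dedup r = r := by
        rw [PySem.List.dedup_eq_ofList]; exact PySem.Set.ofList_eq_self_of_nodup _ hnd
      cases hmin : PySem.List.min? r (pvBase profile) with
      | none => exact absurd ((PySem.List.min?_eq_none_iff _ _).mp hmin) hne
      | some m =>
        have hmem : m ∈ r := PySem.List.min?_mem hmin
        have hminkey : PySem.List.min? (pvAScores profile r).keys (fun c => (pvAScores profile r).getD c 0) =
            some m := by
          rw [hkeys, hded, pvMin?_congr' r _ (pvBase profile) (fun c hc => pvAScores_getD profile r c hc), hmin]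
        have hsort := pvSorted_min_cons (pvBase profile) r m hmin
        have herase_ne : r.erase m ≠ [] := by
          have hle := List.length_erase_of_mem hmem
          intro hh; rw [hh] at hle; simp at hle; omega
        cases hs : PySem.List.sorted (r.erase m) (pvBase profile) false with
        | nil => exact absurd ((PySem.List.sorted_eq_nil_iff _ _ _).mp hs) herase_ne
        | cons c' rest =>
          simp only [pvALoop, if_pos hlong, hminkey]
          rw [pvAScores_getD profile r m hmem]
          rw [hsort, hs, pvBScanAbs]
          by_cases hreq : req ≤ pvBase profile m
          · rw [if_pos hreq, if_pos hreq]
          · rw [if_neg hreq, if_neg hreq]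
            rw [PySem.List.remove?_eq_some_erase r m hmem]
            have hlen' : (r.erase m).length ≤ f + 1 := by
              have := List.length_erase_of_mem hmem
              omega
            show pvALoop profile req f (r.erase m) = pvBScanAbs req (pvBase profile) (c' :: rest)
            rw [ih (r.erase m) (hnd.erase m) herase_ne hlen', hs]
    · obtain ⟨c, hc⟩ : ∃ c, r = [c] := by
        cases r with
        | nil => exact absurd rfl hne
        | cons a t => cases t with
          | nil => exact ⟨a, rfl⟩
          | cons b u => simp at hlong
      subst hc
      simp [pvALoop, PySem.List.sorted, PySem.List.insertBy, pvBScanAbs]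

lemma pvBScan_congr (req : Int) (d : PySem.Dict String Int) (f : String → Int) : ∀ (l : List String),
    (∀ c ∈ l, d.getD c 0 = f c) → pvBScan req d l = pvBScanAbs req f l := by
  intro l
  induction l with
  | nil => intro _; rfl
  | cons c tail ih =>
    intro h
    cases tail with
    | nil => simp [pvBScan, pvBScanAbs]
    | cons c' rest =>
      simp only [pvBScan, pvBScanAbs]
      rw [h c List.mem_cons_self]
      split_ifs with hr
      · rfl
      · exact ih (fun x hx => h x (List.mem_cons_of_mem _ hx))

-- ===== VERDICT (by name: the statement is the Claim_ definition above) =====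
theorem absolute_majority_spec : Claim_equal_absolute_majority := by
  intro profile hdom hpre
  obtain ⟨hne, hballots, hnd⟩ := hpre
  unfold Spec_absolute_majority absolute_majority absolute_majority_alt
  simp only []
  set r := (profile.headD (0, [])).2 with hr
  have hrne : r ≠ [] := by
    cases profile with
    | nil => exact absurd rfl hne
    | cons v p => exact hballots v List.mem_cons_self
  have hded : PySem.List.dedup r = r := by
    rw [PySem.List.dedup_eq_ofList]; exact PySem.Set.ofList_eq_self_of_nodup _ hnd
  set req := PySem.Int.floordiv (profile.map (·.1)).sum 2 + 1 with hreq
  rw [pvLoop_eq profile req r.length r hnd hrne (by omega)]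
  rw [hded]
  set scoresB := profile.foldl
    (fun d v => if d.contains (v.2.headD "") then d.modify (v.2.headD "") 0 (· + v.1) else d)
    (r.foldl (fun d c => d.insert c 0) PySem.Dict.empty) with hscB
  have hkeys0 : (r.foldl (fun d c => d.insert c 0) (PySem.Dict.empty : PySem.Dict String Int)).keys = r := by
    have h := pvInit_keys r
    rw [hded] at h
    exact h
  obtain ⟨_, hval⟩ := pvBFold_spec r profile _ hkeys0
  have hvals : ∀ c ∈ r, scoresB.getD c 0 = pvBase profile c := by
    intro c hc
    rw [hscB, hval c hc, pvInit_getD c r PySem.Dict.empty (PySem.Dict.getD_empty c 0)]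
    ring
  rw [pvSorted_congr (fun c => scoresB.getD c 0) (pvBase profile) r hvals]
  symm
  exact pvBScan_congr req scoresB (pvBase profile) _
    (fun c hc => hvals c ((PySem.List.mem_sorted r (pvBase profile) false c).mp hc))
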